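-- pv_equiv track=rewrite | github.com/didudash/advent_of_code | 13/main.py | find_twins
-- ===== SOURCE A (Python) =====
-- def find_dict_twins(d):
--     twins = []
--     keys_visited = set()
--     for key1 in d:
--         for key2 in d:
--             if key1 != key2 and key1 not in keys_visited and key2 not in keys_visited:
--                 if sorted(d[key1]) == sorted(d[key2]):
--                     twins.append((key1, key2))
--                     keys_visited.add(key1)
--                     keys_visited.add(key2)
--     return twins
--
-- def find_twins(positions):
--     rows = {}
--     cols = {}
--     for row, col in positions:
--         rows.setdefault(row, []).append(col)
--         cols.setdefault(col, []).append(row)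
--
--     row_twins = find_dict_twins(rows)
--     col_twins = find_dict_twins(cols)
--
--     return row_twins, col_twins
-- ===== SOURCE B (Python) =====
-- def find_twins(positions):
--     rows = {}
--     cols = {}
--     for row, col in positions:
--         rows.setdefault(row, []).append(col)
--         cols.setdefault(col, []).append(row)
--     return _twins_of(rows), _twins_of(cols)
--
--
-- def _twins_of(d):
--     # one pass: group keys by their sorted-value signature on the fly,
--     # pairing each key with the previous unpaired key of the same signature
--     pending = {}  # signature -> key still waiting for a partner
--     mate = {}     # first key of a pair -> its partner
--     for key, vals in d.items():
--         sig = tuple(sorted(vals))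
--         if sig in pending:
--             mate[pending.pop(sig)] = key
--         else:
--             pending[sig] = key
--     return [(key, mate[key]) for key in d if key in mate]
-- ===== Notes on version B (the rewrite author's own statement) =====
-- stated objective: faster
-- what changed: replaces the O(n^2) nested scan with a visited set by a single pass that groups keys by their sorted-value signature in two hash maps (pending/mate) and pairs each key with the previous unpaired key of the same signature
import Mathlib
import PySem

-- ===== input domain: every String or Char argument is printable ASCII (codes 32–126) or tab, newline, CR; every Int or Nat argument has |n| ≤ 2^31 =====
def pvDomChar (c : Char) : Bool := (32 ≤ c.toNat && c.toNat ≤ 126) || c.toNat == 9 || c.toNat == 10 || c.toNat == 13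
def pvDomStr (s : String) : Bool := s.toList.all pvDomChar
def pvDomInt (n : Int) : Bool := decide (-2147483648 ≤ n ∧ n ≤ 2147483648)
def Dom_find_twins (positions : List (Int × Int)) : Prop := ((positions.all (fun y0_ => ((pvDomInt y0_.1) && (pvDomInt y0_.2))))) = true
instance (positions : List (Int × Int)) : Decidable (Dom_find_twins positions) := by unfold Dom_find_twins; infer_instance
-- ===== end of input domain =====

-- B replaces A's O(n^2) nested key scan by a single pass over the keys that pairs
-- each key with the previous unpaired key of the same sorted-value signature (faster).

-- ===== PORT A =====
def find_dict_twins (d : PySem.Dict Int (List Int)) : List (Int × Int) :=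
  (d.keys.foldl (fun st key1 =>
    d.keys.foldl (fun st key2 =>
      if key1 ≠ key2 ∧ PySem.Set.contains st.2 key1 = false ∧ PySem.Set.contains st.2 key2 = false then
        if PySem.List.sorted (d.getD key1 []) id = PySem.List.sorted (d.getD key2 []) id then
          (st.1 ++ [(key1, key2)], PySem.Set.add (PySem.Set.add st.2 key1) key2)
        else st
      else st) st)
    (([], PySem.Set.empty) : List (Int × Int) × PySem.Set Int)).1

def find_twins (positions : List (Int × Int)) : (List (Int × Int)) × (List (Int × Int)) :=
  let rows := positions.foldl (fun d p => d.modify p.1 [] (fun v => v ++ [p.2])) PySem.Dict.empty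
  let cols := positions.foldl (fun d p => d.modify p.2 [] (fun v => v ++ [p.1])) PySem.Dict.empty
  (find_dict_twins rows, find_dict_twins cols)

-- ===== PORT B =====
def twins_of (d : PySem.Dict Int (List Int)) : List (Int × Int) :=
  let pm := d.items.foldl (fun st kv =>
      match PySem.Dict.pop? st.1 (PySem.List.sorted kv.2 id) with
      | some (p, pending') => (pending', st.2.insert p kv.1)
      | none => (st.1.insert (PySem.List.sorted kv.2 id) kv.1, st.2))
    ((PySem.Dict.empty : PySem.Dict (List Int) Int), (PySem.Dict.empty : PySem.Dict Int Int))
  d.keys.filterMap (fun key => (pm.2.get? key).map (fun v => (key, v)))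

def find_twins_alt (positions : List (Int × Int)) : (List (Int × Int)) × (List (Int × Int)) :=
  let rows := positions.foldl (fun d p => d.modify p.1 [] (fun v => v ++ [p.2])) PySem.Dict.empty
  let cols := positions.foldl (fun d p => d.modify p.2 [] (fun v => v ++ [p.1])) PySem.Dict.empty
  (twins_of rows, twins_of cols)

-- ===== PRECONDITION & SPEC =====
def Spec_find_twins (positions : List (Int × Int)) (out : (List (Int × Int)) × (List (Int × Int))) : Prop := out = find_twins_alt positions
instance (positions : List (Int × Int)) (out : (List (Int × Int)) × (List (Int × Int))) : Decidable (Spec_find_twins positions out) := by unfold Spec_find_twins; infer_instance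

-- ===== CLAIM (what is proved, stated in full; the proofs are below) =====
def Claim_equal_find_twins : Prop := ∀ (positions : List (Int × Int)), Dom_find_twins positions → Spec_find_twins positions (find_twins positions)

-- ===== LEMMAS AND PROOFS =====

-- the signature of a key of d: the sorted list of values collected under it
def sigOf (d : PySem.Dict Int (List Int)) (k : Int) : List Int :=
  PySem.List.sorted (d.getD k []) id

-- canonical greedy pairing: pair the first key with the first later key of equal
-- signature, remove it, continue; both ports are reduced to this
def specPairs (f : Int → List Int) : List Int → List (Int × Int)
  | [] => []
  | k :: r =>
    match r.find? (fun j => f j == f k) with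
    | some j => (k, j) :: specPairs f (r.erase j)
    | none => specPairs f r
termination_by l => l.length
decreasing_by
  · exact Nat.lt_succ_of_le (List.length_erase_le)
  · exact Nat.lt_succ_self _

-- ---------- small set/dict facts ----------
theorem set_contains_add (s : PySem.Set Int) (x y : Int) :
    PySem.Set.contains (PySem.Set.add s x) y = (PySem.Set.contains s y || y == x) := by
  simp only [PySem.Set.add, PySem.Set.contains]
  split
  · rename_i h
    by_cases hyx : y = x
    · subst hyx; simp_all
    · simp [hyx]
  · by_cases hyx : y = x <;> simp [hyx]

theorem erase_find_aux (l : List (List Int × Int)) (k k' : List Int) :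
    (l.filter (fun p => !(p.1 == k))).find? (fun p => p.1 == k')
      = if k' = k then none else l.find? (fun p => p.1 == k') := by
  induction l with
  | nil => simp
  | cons p t ih =>
    by_cases hpk : p.1 = k <;> by_cases hpk' : p.1 = k' <;>
      split_ifs with h <;> simp_all

theorem dict_get?_erase (d : PySem.Dict (List Int) Int) (k k' : List Int) :
    (d.erase k).get? k' = if k' = k then none else d.get? k' := by
  simp only [PySem.Dict.erase, PySem.Dict.get?, erase_find_aux]
  split <;> rfl

theorem dict_pop?_eq (d : PySem.Dict (List Int) Int) (k : List Int) :
    d.pop? k = (d.get? k).map (fun v => (v, d.erase k)) := rfl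

theorem find?_congr_mem {α : Type} (l : List α) (p q : α → Bool) (h : ∀ x ∈ l, p x = q x) :
    l.find? p = l.find? q := by
  induction l with
  | nil => rfl
  | cons a t ih =>
    simp only [List.find?_cons, h a (by simp)]
    cases q a
    · exact ih (fun x hx => h x (by simp [hx]))
    · rfl

theorem contains_true_iff (s : PySem.Set Int) (x : Int) :
    PySem.Set.contains s x = true ↔ x ∈ s := by
  simp [PySem.Set.contains]

theorem contains_false_iff (s : PySem.Set Int) (x : Int) :
    PySem.Set.contains s x = false ↔ x ∉ s := by
  simp [PySem.Set.contains]

-- ---------- A side ----------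
def aInner (f : Int → List Int) (key1 : Int) (st : List (Int × Int) × PySem.Set Int) (key2 : Int) :
    List (Int × Int) × PySem.Set Int :=
  if key1 ≠ key2 ∧ PySem.Set.contains st.2 key1 = false ∧ PySem.Set.contains st.2 key2 = false then
    if f key1 = f key2 then (st.1 ++ [(key1, key2)], PySem.Set.add (PySem.Set.add st.2 key1) key2)
    else st
  else st

theorem find_dict_twins_def (d : PySem.Dict Int (List Int)) :
    find_dict_twins d
      = (d.keys.foldl (fun st key1 => d.keys.foldl (aInner (sigOf d) key1) st)
          ([], PySem.Set.empty)).1 := rfl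

theorem aInner_fold_visited (f : Int → List Int) (k1 : Int) (l : List Int)
    (st : List (Int × Int) × PySem.Set Int) (h : PySem.Set.contains st.2 k1 = true) :
    l.foldl (aInner f k1) st = st := by
  induction l with
  | nil => rfl
  | cons a t ih =>
    have h' : k1 ∈ st.2 := by simpa [PySem.Set.contains] using h
    simp [List.foldl_cons, aInner, h', ih]

theorem aInner_fold_char (f : Int → List Int) (k1 : Int) (l : List Int)
    (tw : List (Int × Int)) (vis : PySem.Set Int) (h : PySem.Set.contains vis k1 = false) :
    l.foldl (aInner f k1) (tw, vis)
      = match l.find? (fun k2 => decide (k1 ≠ k2) && !PySem.Set.contains vis k2 && decide (f k1 = f k2)) with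
        | some k2 => (tw ++ [(k1, k2)], PySem.Set.add (PySem.Set.add vis k1) k2)
        | none => (tw, vis) := by
  induction l generalizing tw with
  | nil => rfl
  | cons a t ih =>
    simp only [List.foldl_cons, List.find?_cons]
    by_cases hp : (decide (k1 ≠ a) && !PySem.Set.contains vis a && decide (f k1 = f a)) = true
    · simp only [hp]
      obtain ⟨⟨h1, h2⟩, h3⟩ : (decide (k1 ≠ a) = true ∧ (!PySem.Set.contains vis a) = true) ∧ decide (f k1 = f a) = true := by
        simpa [Bool.and_eq_true] using hp
      have hstep : aInner f k1 (tw, vis) a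
          = (tw ++ [(k1, a)], PySem.Set.add (PySem.Set.add vis k1) a) := by
        simp only [aInner]
        rw [if_pos, if_pos]
        · exact of_decide_eq_true h3
        · exact ⟨of_decide_eq_true h1, h, by simpa using h2⟩
      rw [hstep]
      apply aInner_fold_visited
      simp
    · simp only [Bool.not_eq_true] at hp
      simp only [hp]
      have hstep : aInner f k1 (tw, vis) a = (tw, vis) := by
        simp only [aInner]
        split_ifs with hc hf
        · have ha : a ∉ vis := by simpa [PySem.Set.contains] using hc.2.2
          exact absurd hp (by simp [hc.1, hf, ha])
        · rfl
        · rfl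
      rw [hstep, ih]

theorem aOuter_fold (f : Int → List Int) (L : List Int) (hL : L.Nodup) :
    ∀ (R : List Int) (tw : List (Int × Int)) (vis : PySem.Set Int),
      (∃ P, L = P ++ R) →
      (∀ k ∈ L, PySem.Set.contains vis k = false →
        k ∈ R ∨ (∀ j ∈ L, PySem.Set.contains vis j = false → j ≠ k → f j ≠ f k)) →
      (R.foldl (fun st k1 => L.foldl (aInner f k1) st) (tw, vis)).1
        = tw ++ specPairs f (R.filter (fun k => !PySem.Set.contains vis k)) := by
  intro R
  induction R with
  | nil => intro tw vis _ _; simp [specPairs]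
  | cons k1 R' ih =>
    intro tw vis hPex hinv
    obtain ⟨P, hP⟩ := hPex
    have hPex' : ∃ P', L = P' ++ R' := ⟨P ++ [k1], by rw [hP, List.append_assoc]; rfl⟩
    have hk1L : k1 ∈ L := by rw [hP]; simp
    have hLnd : (k1 :: R').Nodup := by
      rw [hP] at hL; exact (List.nodup_append.mp hL).2.1
    have hk1R' : k1 ∉ R' := by
      have := hLnd; simp [List.nodup_cons] at this; exact this.1
    have hR'nd : R'.Nodup := (List.nodup_cons.mp hLnd).2
    simp only [List.foldl_cons]
    by_cases hv : PySem.Set.contains vis k1 = true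
    · rw [aInner_fold_visited f k1 L (tw, vis) hv]
      have hm : k1 ∈ vis := (contains_true_iff vis k1).mp hv
      have hfil : (k1 :: R').filter (fun k => !PySem.Set.contains vis k)
          = R'.filter (fun k => !PySem.Set.contains vis k) := by
        simp [hm]
      rw [hfil]
      apply ih tw vis hPex'
      intro k hk hkv
      rcases hinv k hk hkv with hmem | hnm
      · rcases List.mem_cons.mp hmem with rfl | h
        · rw [hv] at hkv; cases hkv
        · exact Or.inl h
      · exact Or.inr hnm
    · have hv' : PySem.Set.contains vis k1 = false := by simpa using hv
      rw [aInner_fold_char f k1 L tw vis hv']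
      -- the inner scan over L finds the same key as a scan over R' only
      have hnoP : ∀ x ∈ P, ¬ ((fun k2 => decide (k1 ≠ k2) && !PySem.Set.contains vis k2 && decide (f k1 = f k2)) x = true) := by
        intro x hxP hx
        simp only [Bool.and_eq_true, decide_eq_true_eq, Bool.not_eq_true'] at hx
        obtain ⟨⟨hne, hxv⟩, hfx⟩ := hx
        have hxL : x ∈ L := by rw [hP]; exact List.mem_append_left _ hxP
        rcases hinv x hxL hxv with hmem | hnm
        · rcases List.mem_cons.mp hmem with rfl | hxR'
          · exact hne rfl
          · have := List.nodup_append.mp (hP ▸ hL)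
            exact this.2.2 x hxP x (by simp [hxR']) rfl
        · exact hnm k1 hk1L hv' hne hfx
      have hfindL : L.find? (fun k2 => decide (k1 ≠ k2) && !PySem.Set.contains vis k2 && decide (f k1 = f k2))
          = R'.find? (fun k2 => decide (k1 ≠ k2) && !PySem.Set.contains vis k2 && decide (f k1 = f k2)) := by
        rw [hP, List.find?_append, List.find?_eq_none.mpr hnoP]
        simp
      have hfind2 : R'.find? (fun k2 => decide (k1 ≠ k2) && !PySem.Set.contains vis k2 && decide (f k1 = f k2))
          = (R'.filter (fun k => !PySem.Set.contains vis k)).find? (fun j => f j == f k1) := by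
        rw [List.find?_filter]
        apply find?_congr_mem
        intro x hx
        have hxk1 : k1 ≠ x := fun h => hk1R' (h ▸ hx)
        by_cases hxv : x ∈ vis <;>
          by_cases hfx : f k1 = f x <;>
            simp [hxk1, hxv, hfx, show (f x = f k1) ↔ (f k1 = f x) from eq_comm]
      have hm1 : k1 ∉ vis := (contains_false_iff vis k1).mp hv'
      have hfil : (k1 :: R').filter (fun k => !PySem.Set.contains vis k)
          = k1 :: R'.filter (fun k => !PySem.Set.contains vis k) := by
        simp [hm1]
      rw [hfindL, hfind2, hfil]
      cases hfound : (R'.filter (fun k => !PySem.Set.contains vis k)).find? (fun j => f j == f k1) with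
      | none =>
        simp only
        rw [specPairs, hfound]
        apply ih tw vis hPex'
        intro k hk hkv
        by_cases hkk1 : k = k1
        · subst hkk1
          refine Or.inr ?_
          intro j hj hjv hjk hfj
          have : ¬ ((fun k2 => decide (k ≠ k2) && !PySem.Set.contains vis k2 && decide (f k = f k2)) j = true) := by
            rw [hP] at hj
            rcases List.mem_append.mp hj with hjP | hjKR
            · exact hnoP j hjP
            · rcases List.mem_cons.mp hjKR with rfl | hjR'
              · exact absurd rfl hjk
              · intro hpj
                have := List.find?_eq_none.mp (hfind2 ▸ hfound) j hjR'
                exact this hpj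
          have hjvm : j ∉ vis := (contains_false_iff vis j).mp hjv
          exact this (by simp [Ne.symm hjk, hjvm, hfj.symm])
        · rcases hinv k hk hkv with hmem | hnm
          · rcases List.mem_cons.mp hmem with rfl | h
            · exact absurd rfl hkk1
            · exact Or.inl h
          · exact Or.inr hnm
      | some j =>
        simp only
        rw [specPairs, hfound]
        have hjfil : j ∈ R'.filter (fun k => !PySem.Set.contains vis k) :=
          List.mem_of_find?_eq_some hfound
        have hjR' : j ∈ R' := (List.mem_filter.mp hjfil).1
        have hjv : PySem.Set.contains vis j = false := by
          have := (List.mem_filter.mp hjfil).2; simpa using this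
        have hfilnd : (R'.filter (fun k => !PySem.Set.contains vis k)).Nodup := hR'nd.filter _
        have hfil' : R'.filter (fun k => !PySem.Set.contains (PySem.Set.add (PySem.Set.add vis k1) j) k)
            = (R'.filter (fun k => !PySem.Set.contains vis k)).erase j := by
          rw [List.Nodup.erase_eq_filter hfilnd, List.filter_filter]
          apply List.filter_congr
          intro x hx
          have hxk1 : ¬ (x == k1) = true := by
            simp only [beq_iff_eq]; intro h; exact hk1R' (h ▸ hx)
          by_cases hxv : PySem.Set.contains vis x = true <;>
            by_cases hxj : (x == j) = true <;>
              simp_all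
        have := ih (tw ++ [(k1, j)]) (PySem.Set.add (PySem.Set.add vis k1) j) hPex' ?_
        · rw [this, hfil']
          simp
        · intro k hk hkv
          have hkk1 : k ≠ k1 := by
            intro h; subst h; simp at hkv
          have hkj : k ≠ j := by
            intro h; subst h; simp at hkv
          have hkvold : PySem.Set.contains vis k = false := by
            simp only [set_contains_add, Bool.or_eq_false_iff] at hkv
            exact hkv.1.1
          rcases hinv k hk hkvold with hmem | hnm
          · rcases List.mem_cons.mp hmem with rfl | h
            · exact absurd rfl hkk1
            · exact Or.inl h
          · refine Or.inr ?_
            intro j' hj' hj'v hj'k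
            have hj'vold : PySem.Set.contains vis j' = false := by
              simp only [set_contains_add, Bool.or_eq_false_iff] at hj'v
              exact hj'v.1.1
            exact hnm j' hj' hj'vold hj'k

theorem find_dict_twins_eq_spec (d : PySem.Dict Int (List Int)) (hnd : d.keys.Nodup) :
    find_dict_twins d = specPairs (sigOf d) d.keys := by
  rw [find_dict_twins_def]
  rw [aOuter_fold (sigOf d) d.keys hnd d.keys [] PySem.Set.empty ⟨[], rfl⟩ (fun k hk _ => Or.inl hk)]
  have : d.keys.filter (fun k => !PySem.Set.contains PySem.Set.empty k) = d.keys :=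
    List.filter_eq_self.mpr (fun a _ => by simp [PySem.Set.empty])
  rw [this, List.nil_append]

-- ---------- B side ----------
def pairsOf : List Int → List (Int × Int)
  | a :: b :: r => (a, b) :: pairsOf r
  | _ => []

def cls (f : Int → List Int) (t : List Int) (ks : List Int) : List Int :=
  ks.filter (fun k => f k == t)

def oddLast (c : List Int) : Option Int :=
  if c.length % 2 = 1 then c.getLast? else none

def mateSpec (f : Int → List Int) (ks : List Int) (a : Int) : Option Int :=
  ((pairsOf (cls f (f a) ks)).find? (fun p => p.1 == a)).map (fun p => p.2)

def bStep (f : Int → List Int) (st : PySem.Dict (List Int) Int × PySem.Dict Int Int) (k : Int) :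
    PySem.Dict (List Int) Int × PySem.Dict Int Int :=
  match PySem.Dict.pop? st.1 (f k) with
  | some (p, pending') => (pending', st.2.insert p k)
  | none => (st.1.insert (f k) k, st.2)

theorem pairsOf_append_oddLast (c : List Int) (k : Int) :
    pairsOf (c ++ [k]) = pairsOf c ++ ((oddLast c).map (fun p => (p, k))).toList := by
  induction c using pairsOf.induct with
  | case1 a b r ih =>
    simp only [List.cons_append, pairsOf, ih, oddLast]
    have hlen : (a :: b :: r).length % 2 = r.length % 2 := by simp [List.length_cons]; omega
    rw [hlen]
    by_cases hodd : r.length % 2 = 1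
    · simp only [hodd]
      cases hr : r with
      | nil => simp [hr] at hodd
      | cons x xs => simp [List.getLast?_cons_cons]
    · simp [hodd]
  | case2 c h =>
    cases c with
    | nil => simp [pairsOf, oddLast]
    | cons a t =>
      cases t with
      | nil => simp [pairsOf, oddLast]
      | cons b r => exact absurd rfl (fun hh => h a b r hh)

theorem pairsOf_mem (c : List Int) (q : Int × Int) (h : q ∈ pairsOf c) : q.1 ∈ c ∧ q.2 ∈ c := by
  induction c using pairsOf.induct with
  | case1 a b r ih =>
    simp only [pairsOf, List.mem_cons] at h
    rcases h with rfl | h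
    · simp
    · have := ih h; exact ⟨by simp [this.1], by simp [this.2]⟩
  | case2 c hc =>
    cases c with
    | nil => simp [pairsOf] at h
    | cons a t =>
      cases t with
      | nil => simp [pairsOf] at h
      | cons b r => exact absurd rfl (fun hh => hc a b r hh)

theorem pairsOf_last_not_first (c : List Int) (p : Int) (hnd : c.Nodup)
    (hodd : c.length % 2 = 1) (hlast : c.getLast? = some p) :
    ∀ q ∈ pairsOf c, q.1 ≠ p := by
  induction c using pairsOf.induct with
  | case1 a b r ih =>
    intro q hq
    have hr : r ≠ [] := by
      intro h; subst h; simp at hodd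
    have hlast : r.getLast? = some p := by
      rw [List.getLast?_cons_cons] at hlast
      cases r with
      | nil => exact absurd rfl hr
      | cons x xs => exact hlast
    have hpr : p ∈ r := List.mem_of_getLast? hlast
    simp only [pairsOf, List.mem_cons] at hq
    rcases hq with rfl | hq
    · simp only [List.nodup_cons, List.mem_cons] at hnd
      intro h
      simp only at h
      exact hnd.1 (Or.inr (h.symm ▸ hpr))
    · exact ih hnd.of_cons.of_cons (by simp at hodd ⊢; omega) hlast q hq
  | case2 c hc =>
    intro q hq
    cases c with
    | nil => simp [pairsOf] at hq
    | cons a t =>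
      cases t with
      | nil => simp [pairsOf] at hq
      | cons b r => exact absurd rfl (fun hh => hc a b r hh)

theorem cls_concat (f : Int → List Int) (t : List Int) (ks : List Int) (k : Int) :
    cls f t (ks ++ [k]) = cls f t ks ++ (if (f k == t) = true then [k] else []) := by
  simp only [cls, List.filter_append, List.filter_cons, List.filter_nil]

theorem oddLast_concat (c : List Int) (k : Int) :
    oddLast (c ++ [k]) = if c.length % 2 = 1 then none else some k := by
  simp only [oddLast, List.length_append, List.length_cons, List.length_nil]
  by_cases h : c.length % 2 = 1
  · have : ¬ (c.length + 1) % 2 = 1 := by omega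
    simp [h, this]
  · have : (c.length + 1) % 2 = 1 := by omega
    simp [h, this]

theorem bFold_get (f : Int → List Int) (ks : List Int) (hnd : ks.Nodup) :
    (∀ t, ((ks.foldl (bStep f) (PySem.Dict.empty, PySem.Dict.empty)).1.get? t = oddLast (cls f t ks)))
    ∧ (∀ a, ((ks.foldl (bStep f) (PySem.Dict.empty, PySem.Dict.empty)).2.get? a = mateSpec f ks a)) := by
  induction ks using List.reverseRecOn with
  | nil =>
    constructor
    · intro t; simp [PySem.Dict.get?_empty, oddLast, cls]
    · intro a; simp [PySem.Dict.get?_empty, mateSpec, cls, pairsOf]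
  | append_singleton ks k ih =>
    have hks : ks.Nodup := (List.nodup_append.mp hnd).1
    have hkks : k ∉ ks := by
      intro h
      exact (List.nodup_append.mp hnd).2.2 k h k (by simp) rfl
    obtain ⟨ih1, ih2⟩ := ih hks
    rw [List.foldl_append]
    set st := ks.foldl (bStep f) (PySem.Dict.empty, PySem.Dict.empty) with hst
    simp only [List.foldl_cons, List.foldl_nil]
    have hcnd : (cls f (f k) ks).Nodup := hks.filter _
    cases hc : st.1.get? (f k) with
    | none =>
      have hodd : oddLast (cls f (f k) ks) = none := by rw [← ih1]; exact hc
      have heven : ¬ (cls f (f k) ks).length % 2 = 1 := by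
        simp only [oddLast] at hodd
        intro h1
        rw [if_pos h1] at hodd
        cases hcl : cls f (f k) ks with
        | nil => simp [hcl] at h1
        | cons x xs => rw [hcl] at hodd; simp at hodd
      have hstep : bStep f st k = (st.1.insert (f k) k, st.2) := by
        simp only [bStep, dict_pop?_eq, hc]; rfl
      rw [hstep]
      constructor
      · intro t
        rw [PySem.Dict.get?_insert, cls_concat]
        by_cases ht : t = f k
        · subst ht
          rw [if_pos rfl, if_pos (beq_self_eq_true (f k)), oddLast_concat, if_neg heven]
        · have : (f k == t) = false := by simp [Ne.symm ht]
          simp [ht, this, ih1]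
      · intro a
        rw [ih2 a]
        unfold mateSpec
        rw [cls_concat]
        by_cases hfa : f k = f a
        · have hcond : (f k == f a) = true := by simp [hfa]
          rw [if_pos hcond, pairsOf_append_oddLast, ← hfa, hodd]
          simp
        · have hcond : ¬ ((f k == f a) = true) := by simp [hfa]
          rw [if_neg hcond]
          simp
    | some p =>
      have hodd : oddLast (cls f (f k) ks) = some p := by rw [← ih1]; exact hc
      have hoddlen : (cls f (f k) ks).length % 2 = 1 := by
        by_contra h1
        simp [oddLast, h1] at hodd
      have hlastp : (cls f (f k) ks).getLast? = some p := by
        simpa [oddLast, hoddlen] using hodd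
      have hpmem : p ∈ cls f (f k) ks := List.mem_of_getLast? hlastp
      have hfp : f p = f k := by
        have := (List.mem_filter.mp hpmem).2
        simpa using this
      have hpks : p ∈ ks := (List.mem_filter.mp hpmem).1
      have hpk : p ≠ k := fun h => hkks (h ▸ hpks)
      have hstep : bStep f st k = (st.1.erase (f k), st.2.insert p k) := by
        simp only [bStep, dict_pop?_eq, hc]; rfl
      rw [hstep]
      constructor
      · intro t
        rw [dict_get?_erase, cls_concat]
        by_cases ht : t = f k
        · subst ht
          rw [if_pos rfl, if_pos (beq_self_eq_true (f k)), oddLast_concat, if_pos hoddlen]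
        · have : (f k == t) = false := by simp [Ne.symm ht]
          simp [ht, this, ih1]
      · intro a
        rw [PySem.Dict.get?_insert]
        unfold mateSpec
        rw [cls_concat]
        by_cases hap : a = p
        · subst hap
          have hcond : (f k == f a) = true := by simp [hfp]
          rw [if_pos hcond, pairsOf_append_oddLast, hfp, hodd]
          rw [List.find?_append]
          rw [List.find?_eq_none.mpr (fun q hq => by
            simpa using pairsOf_last_not_first _ _ hcnd hoddlen hlastp q hq)]
          simp
        · rw [if_neg hap, ih2 a]
          unfold mateSpec
          by_cases hfa : f k = f a
          · have hcond : (f k == f a) = true := by simp [hfa]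
            rw [if_pos hcond, ← hfa, pairsOf_append_oddLast, hodd]
            rw [List.find?_append]
            cases hfq : (pairsOf (cls f (f k) ks)).find? (fun q => q.1 == a) with
            | none => simp [Ne.symm hap]
            | some q => simp
          · have hcond : ¬ ((f k == f a) = true) := by simp [hfa]
            rw [if_neg hcond]
            simp

theorem twins_of_eq (d : PySem.Dict Int (List Int)) (hnd : d.keys.Nodup) :
    twins_of d = d.keys.filterMap (fun a => (mateSpec (sigOf d) d.keys a).map (fun b => (a, b))) := by
  unfold twins_of
  rw [PySem.Dict.items_eq_map_keys d hnd [], List.foldl_map]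
  show d.keys.filterMap (fun key =>
      (((d.keys.foldl (bStep (sigOf d)) (PySem.Dict.empty, PySem.Dict.empty)).2.get? key).map
        (fun v => (key, v)))) = _
  exact List.filterMap_congr (fun a _ => by rw [(bFold_get (sigOf d) d.keys hnd).2 a])

theorem find?_eq_head_filter {α : Type} (l : List α) (p : α → Bool) :
    l.find? p = (l.filter p).head? := by
  induction l with
  | nil => rfl
  | cons a t ih =>
    simp only [List.find?_cons, List.filter_cons]
    cases hpa : p a
    · simpa using ih
    · rfl

theorem filterMap_filter_ne (F : Int → Option (Int × Int)) (j : Int) (hj : F j = none)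
    (l : List Int) : (l.filter (fun x => x != j)).filterMap F = l.filterMap F := by
  induction l with
  | nil => rfl
  | cons a t ih =>
    by_cases haj : a = j
    · subst haj
      simp [hj, ih]
    · have : (a != j) = true := by simp [haj]
      simp only [List.filter_cons, this, if_pos, List.filterMap_cons, ih]

-- ---------- cross lemma ----------
theorem mate_filterMap_eq_specPairs (f : Int → List Int) :
    ∀ (n : Nat) (ks : List Int), ks.length ≤ n → ks.Nodup →
      ks.filterMap (fun a => (mateSpec f ks a).map (fun b => (a, b))) = specPairs f ks := by
  intro n
  induction n with
  | zero =>
    intro ks hlen _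
    have : ks = [] := List.eq_nil_of_length_eq_zero (Nat.le_zero.mp hlen)
    subst this
    simp [specPairs]
  | succ n ihn =>
    intro ks hlen hnd
    cases ks with
    | nil => simp [specPairs]
    | cons k r =>
      have hrlen : r.length ≤ n := by simpa using hlen
      have hrnd : r.Nodup := (List.nodup_cons.mp hnd).2
      have hkr : k ∉ r := (List.nodup_cons.mp hnd).1
      have hclsk : cls f (f k) (k :: r) = k :: cls f (f k) r := by
        simp [cls]
      rw [List.filterMap_cons]
      cases hG : cls f (f k) r with
      | nil =>
        have hfind : r.find? (fun j => f j == f k) = none := by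
          rw [find?_eq_head_filter]
          show (cls f (f k) r).head? = none
          rw [hG]; rfl
        have hmk : mateSpec f (k :: r) k = none := by
          unfold mateSpec
          rw [hclsk, hG]
          simp [pairsOf]
        have hcong : ∀ a ∈ r, (mateSpec f (k :: r) a).map (fun b => (a, b))
            = (mateSpec f r a).map (fun b => (a, b)) := by
          intro a ha
          have hfa : (f k == f a) = false := by
            by_contra h
            have hbeq : (f k == f a) = true := by
              cases hh : (f k == f a) <;> simp_all
            have : a ∈ cls f (f k) r := by
              refine List.mem_filter.mpr ⟨ha, ?_⟩
              simp only [beq_iff_eq] at hbeq ⊢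
              exact hbeq.symm
            rw [hG] at this
            simp at this
          have : cls f (f a) (k :: r) = cls f (f a) r := by
            simp only [cls, List.filter_cons]
            rw [if_neg (by simp_all)]
          unfold mateSpec
          rw [this]
        rw [hmk, Option.map_none, specPairs, hfind]
        rw [List.filterMap_congr hcong]
        exact ihn r hrlen hrnd
      | cons j G' =>
        have hjcls : j ∈ cls f (f k) r := by rw [hG]; simp
        have hjr : j ∈ r := (List.mem_filter.mp hjcls).1
        have hfj : f j = f k := by
          have := (List.mem_filter.mp hjcls).2
          simpa using this
        have hjk : j ≠ k := fun h => hkr (h ▸ hjr)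
        have hGnd : (j :: G').Nodup := hG ▸ hrnd.filter _
        have hjG' : j ∉ G' := (List.nodup_cons.mp hGnd).1
        have hfind : r.find? (fun j' => f j' == f k) = some j := by
          rw [find?_eq_head_filter]
          show (cls f (f k) r).head? = some j
          rw [hG]; rfl
        have hmk : mateSpec f (k :: r) k = some j := by
          unfold mateSpec
          rw [hclsk, hG]
          simp [pairsOf]
        have hmj : mateSpec f (k :: r) j = none := by
          unfold mateSpec
          rw [hfj, hclsk, hG]
          simp only [pairsOf, List.find?_cons]
          have : (((k : Int), j).1 == j) = false := by simp [Ne.symm hjk]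
          rw [this]
          rw [List.find?_eq_none.mpr (fun q hq => by
            have := (pairsOf_mem G' q hq).1
            simp only [beq_iff_eq]
            intro h
            exact hjG' (h ▸ this))]
          rfl
        have herase : r.erase j = r.filter (fun x => x != j) := List.Nodup.erase_eq_filter hrnd j
        have hcong : ∀ a ∈ r.erase j, (mateSpec f (k :: r) a).map (fun b => (a, b))
            = (mateSpec f (r.erase j) a).map (fun b => (a, b)) := by
          intro a ha
          have har : a ∈ r := List.mem_of_mem_erase ha
          have haj : a ≠ j := by
            rw [herase] at ha
            have := (List.mem_filter.mp ha).2
            simpa using this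
          have hak : a ≠ k := fun h => hkr (h ▸ har)
          have hclsfil : cls f (f a) (r.erase j) = (cls f (f a) r).filter (fun x => x != j) := by
            rw [herase]
            simp only [cls, List.filter_filter]
            apply List.filter_congr
            intro x _
            rw [Bool.and_comm]
          unfold mateSpec
          by_cases hfa : f k = f a
          · have hclsa : cls f (f a) (k :: r) = k :: j :: G' := by
              simp only [cls, List.filter_cons]
              rw [if_pos (by simp [hfa])]
              show k :: cls f (f a) r = _
              rw [← hfa, hG]
            have hclsa' : cls f (f a) (r.erase j) = G' := by
              rw [hclsfil, ← hfa, hG]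
              simp only [List.filter_cons]
              rw [if_neg (by simp)]
              exact List.filter_eq_self.mpr (fun x hx => by
                simp only [bne_iff_ne, ne_eq]
                intro h; exact hjG' (h ▸ hx))
            rw [hclsa, hclsa']
            simp only [pairsOf, List.find?_cons]
            have : (((k : Int), j).1 == a) = false := by simp [Ne.symm hak]
            rw [this]
          · have hclsa : cls f (f a) (k :: r) = cls f (f a) r := by
              simp only [cls, List.filter_cons]
              rw [if_neg (by simp_all)]
            have hclsa' : cls f (f a) (r.erase j) = cls f (f a) r := by
              rw [hclsfil]
              exact List.filter_eq_self.mpr (fun x hx => by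
                have hfx : f x = f a := by
                  have := (List.mem_filter.mp hx).2
                  simpa using this
                simp only [bne_iff_ne, ne_eq]
                intro h
                subst h
                exact hfa ((hfj.symm.trans hfx).symm ▸ rfl))
            rw [hclsa, hclsa']
        rw [hmk, Option.map_some, specPairs, hfind]
        have hF : (fun a => (mateSpec f (k :: r) a).map (fun b => (a, b))) j = none := by
          simp [hmj]
        rw [← filterMap_filter_ne _ j hF r, ← herase]
        rw [List.filterMap_congr hcong]
        rw [ihn (r.erase j) (le_trans List.length_erase_le hrlen) (hrnd.erase j)]

-- ---------- glue ----------
theorem twins_of_eq_find_dict_twins (d : PySem.Dict Int (List Int)) (hnd : d.keys.Nodup) :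
    find_dict_twins d = twins_of d := by
  rw [find_dict_twins_eq_spec d hnd, twins_of_eq d hnd,
    mate_filterMap_eq_specPairs (sigOf d) d.keys.length d.keys (le_refl _) hnd]

theorem built_nodup (positions : List (Int × Int)) (pick : Int × Int → Int) (val : Int × Int → Int) :
    (positions.foldl (fun d p => d.modify (pick p) [] (fun v => v ++ [val p])) PySem.Dict.empty).keys.Nodup := by
  exact PySem.Dict.nodup_keys_foldl_modify_key positions pick [] (fun _ p v => v ++ [val p])
    PySem.Dict.empty PySem.Dict.nodup_keys_empty

-- ===== VERDICT (by name: the statement is the Claim_ definition above) =====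
theorem find_twins_spec : Claim_equal_find_twins := by
  intro positions _
  unfold Spec_find_twins find_twins find_twins_alt
  refine Prod.ext ?_ ?_ <;> simp only
  · exact twins_of_eq_find_dict_twins _ (built_nodup positions (fun p => p.1) (fun p => p.2))
  · exact twins_of_eq_find_dict_twins _ (built_nodup positions (fun p => p.2) (fun p => p.1))
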